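-- pv_equiv track=rewrite | github.com/xxxxlc/leetcode | GreedyAlgorithm/magicTower.py | magicTower
-- ===== SOURCE A (Python) =====
-- import queue
--
-- def magicTower(nums):
--     """
--     :type nums: List[int]
--     :rtype: int
--     """
--     if (sum(nums) <= -1):
--         return -1
--     life = 1
--     ans = 0
--     c = 0
--     q = queue.PriorityQueue()
--
--     for i in range(len(nums)):
--         life += nums[i]
--         if nums[i] < 0:
--             q.put(nums[i])
--         if life <= c:
--             ans += 1
--             life -= q.get()
--
--
--     if life < 0:
--         return -1
--
--     return ans
-- ===== SOURCE B (Python) =====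
-- def magicTower(nums):
--     if sum(nums) <= -1:
--         return -1
--     life = 1
--     ans = 0
--     removed = set()
--     for i in range(len(nums)):
--         life += nums[i]
--         if life <= 0:
--             w, j = 0, -1
--             for k in range(i + 1):
--                 if k not in removed and nums[k] < w:
--                     w, j = nums[k], k
--             removed.add(j)
--             ans += 1
--             life -= w
--     if life < 0:
--         return -1
--     return ans
-- ===== Notes on version B (the rewrite author's own statement) =====
-- stated objective: alternative
-- what changed: Drops the PriorityQueue entirely: B keeps only a set of already-used room indices and, when life drops to 0 or below, rescans the prefix nums[0..i] for the most negative still-unused room, counting rescues with a plain counter.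
import Mathlib
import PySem

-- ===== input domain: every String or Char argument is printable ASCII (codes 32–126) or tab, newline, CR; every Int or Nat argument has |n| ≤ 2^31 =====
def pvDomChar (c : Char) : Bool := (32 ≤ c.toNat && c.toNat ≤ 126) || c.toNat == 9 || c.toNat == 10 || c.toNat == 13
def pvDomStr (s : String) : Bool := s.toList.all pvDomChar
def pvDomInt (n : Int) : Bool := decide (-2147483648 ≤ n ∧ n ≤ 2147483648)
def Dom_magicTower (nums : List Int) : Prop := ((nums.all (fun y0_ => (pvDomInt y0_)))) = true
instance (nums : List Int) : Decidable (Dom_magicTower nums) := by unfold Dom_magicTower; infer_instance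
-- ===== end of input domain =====

-- B drops A's PriorityQueue: it keeps only a set of already-used room indices and, when life
-- drops to 0 or below, rescans the prefix for the most negative unused room (objective: alternative).

-- ===== PORT A =====
-- A's queue.PriorityQueue is ported as a list kept in ascending order:
-- q.put = ordered insert, q.get = take the head (smallest). Unreachable empty-queue get uses headD 0.
def magicTowerStepA (st : Int × Int × List Int) (x : Int) : Int × Int × List Int :=
  let life := st.1 + x
  let q := if x < 0 then st.2.2.orderedInsert (· ≤ ·) x else st.2.2
  if life ≤ 0 then (life - q.headD 0, st.2.1 + 1, q.tail) else (life, st.2.1, q)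

def magicTower (nums : List Int) : Int :=
  if nums.sum ≤ -1 then -1
  else
    let s := nums.foldl magicTowerStepA (1, 0, [])
    if s.1 < 0 then -1 else s.2.1

-- ===== PORT B =====
-- inner loop 'for k in range(i + 1): if k not in removed and nums[k] < w: w, j = nums[k], k'
def magicTowerScanStep (nums : List Int) (removed : PySem.Set Int) (wj : Int × Int) (k : Int) : Int × Int :=
  if PySem.Set.contains removed k = false ∧ PySem.List.pyGetD nums k 0 < wj.1
  then (PySem.List.pyGetD nums k 0, k) else wj

def magicTowerStepB (nums : List Int) (st : Int × Int × PySem.Set Int) (i : Int) : Int × Int × PySem.Set Int :=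
  let life := st.1 + PySem.List.pyGetD nums i 0
  if life ≤ 0 then
    let wj := (PySem.List.pyRange 0 (i + 1) 1).foldl (magicTowerScanStep nums st.2.2) (0, -1)
    (life - wj.1, st.2.1 + 1, PySem.Set.add st.2.2 wj.2)
  else (life, st.2.1, st.2.2)

def magicTower_alt (nums : List Int) : Int :=
  if nums.sum ≤ -1 then -1
  else
    let s := (PySem.List.pyRange 0 (nums.length : Int) 1).foldl (magicTowerStepB nums) (1, 0, PySem.Set.empty)
    if s.1 < 0 then -1 else s.2.1

-- ===== PRECONDITION & SPEC =====
def Spec_magicTower (nums : List Int) (out : Int) : Prop := out = magicTower_alt nums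
instance (nums : List Int) (out : Int) : Decidable (Spec_magicTower nums out) := by unfold Spec_magicTower; infer_instance

-- ===== CLAIM (what is proved, stated in full; the proofs are below) =====
def Claim_equal_magicTower : Prop := ∀ (nums : List Int), Dom_magicTower nums → Spec_magicTower nums (magicTower nums)

-- ===== LEMMAS AND PROOFS =====

-- value of room k (only used at valid indices)
def pvVal (nums : List Int) (k : Int) : Int := PySem.List.pyGetD nums k 0

-- the multiset of still-available negative rooms among the first i, as B's state encodes it
def pvAvail (nums : List Int) (i : Int) (removed : PySem.Set Int) : List Int :=
  ((PySem.List.pyRange 0 i 1).filter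
    (fun k => decide (pvVal nums k < 0) && !(PySem.Set.contains removed k))).map (pvVal nums)

-- invariant tying A's state (life, ans, sorted queue) to B's state (life, ans, used indices)
def pvInv (nums : List Int) (i : Nat) (a : Int × Int × List Int) (b : Int × Int × PySem.Set Int) : Prop :=
  a.1 = b.1 ∧ a.2.1 = b.2.1 ∧ a.2.2.Pairwise (· ≤ ·) ∧ a.2.2.Perm (pvAvail nums (i : Int) b.2.2) ∧
  (∀ x ∈ b.2.2, x = -1 ∨ (0 ≤ x ∧ x < (i : Int)))

-- the scan's running minimum never rises and ends below every unused candidate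
lemma pvScan_min (nums : List Int) (removed : PySem.Set Int) :
    ∀ (ks : List Int) (w j : Int),
      (ks.foldl (magicTowerScanStep nums removed) (w, j)).1 ≤ w ∧
      ∀ k ∈ ks, PySem.Set.contains removed k = false →
        (ks.foldl (magicTowerScanStep nums removed) (w, j)).1 ≤ pvVal nums k := by
  intro ks
  induction ks with
  | nil => intro w j; exact ⟨le_refl w, by simp⟩
  | cons k ks ih =>
    intro w j
    rw [List.foldl_cons]
    by_cases h : PySem.Set.contains removed k = false ∧ PySem.List.pyGetD nums k 0 < w
    · rw [show magicTowerScanStep nums removed (w, j) k = (PySem.List.pyGetD nums k 0, k) from by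
        unfold magicTowerScanStep; exact if_pos h]
      obtain ⟨h1, h2⟩ := ih (PySem.List.pyGetD nums k 0) k
      refine ⟨le_trans h1 (le_of_lt h.2), ?_⟩
      intro k' hk' hrem
      rcases List.mem_cons.mp hk' with he | hm
      · subst he; exact h1
      · exact h2 k' hm hrem
    · rw [show magicTowerScanStep nums removed (w, j) k = (w, j) from by
        unfold magicTowerScanStep; exact if_neg h]
      obtain ⟨h1, h2⟩ := ih w j
      refine ⟨h1, ?_⟩
      intro k' hk' hrem
      rcases List.mem_cons.mp hk' with he | hm
      · subst he
        rcases not_and_or.mp h with hc | hc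
        · exact absurd hrem (by simpa using hc)
        · exact le_trans h1 (not_lt.mp hc)
      · exact h2 k' hm hrem

-- the scan either keeps its initial state or returns an unused candidate achieving its value
lemma pvScan_cases (nums : List Int) (removed : PySem.Set Int) :
    ∀ (ks : List Int) (w j : Int),
      (ks.foldl (magicTowerScanStep nums removed) (w, j)) = (w, j) ∨
      ((ks.foldl (magicTowerScanStep nums removed) (w, j)).1 < w ∧
       (ks.foldl (magicTowerScanStep nums removed) (w, j)).2 ∈ ks ∧
       PySem.Set.contains removed (ks.foldl (magicTowerScanStep nums removed) (w, j)).2 = false ∧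
       pvVal nums (ks.foldl (magicTowerScanStep nums removed) (w, j)).2 =
         (ks.foldl (magicTowerScanStep nums removed) (w, j)).1) := by
  intro ks
  induction ks with
  | nil => intro w j; exact Or.inl rfl
  | cons k ks ih =>
    intro w j
    rw [List.foldl_cons]
    by_cases h : PySem.Set.contains removed k = false ∧ PySem.List.pyGetD nums k 0 < w
    · rw [show magicTowerScanStep nums removed (w, j) k = (PySem.List.pyGetD nums k 0, k) from by
        unfold magicTowerScanStep; exact if_pos h]
      rcases ih (PySem.List.pyGetD nums k 0) k with he | ⟨h1, h2, h3, h4⟩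
      · refine Or.inr ?_
        rw [he]
        exact ⟨h.2, List.mem_cons_self, h.1, rfl⟩
      · exact Or.inr ⟨lt_trans h1 h.2, List.mem_cons_of_mem _ h2, h3, h4⟩
    · rw [show magicTowerScanStep nums removed (w, j) k = (w, j) from by
        unfold magicTowerScanStep; exact if_neg h]
      rcases ih w j with he | ⟨h1, h2, h3, h4⟩
      · exact Or.inl he
      · exact Or.inr ⟨h1, List.mem_cons_of_mem _ h2, h3, h4⟩

lemma pvAvail_lt_zero (nums : List Int) (i : Int) (removed : PySem.Set Int) :
    ∀ v ∈ pvAvail nums i removed, v < 0 := by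
  intro v hv
  unfold pvAvail at hv
  obtain ⟨k, hk, rfl⟩ := List.mem_map.mp hv
  have h2 := (List.mem_filter.mp hk).2
  simp only [Bool.and_eq_true, decide_eq_true_eq] at h2
  exact h2.1

lemma pvAvail_mem_of (nums : List Int) (i : Int) (removed : PySem.Set Int) (k : Int)
    (hk : k ∈ PySem.List.pyRange 0 i 1) (hneg : pvVal nums k < 0)
    (hrem : PySem.Set.contains removed k = false) : pvVal nums k ∈ pvAvail nums i removed := by
  unfold pvAvail
  have hnm : k ∉ removed := by simpa using hrem
  exact List.mem_map.mpr ⟨k, List.mem_filter.mpr ⟨hk, by simp [hneg, hnm]⟩, rfl⟩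

-- growth of the available multiset when the window widens by one index
lemma pvAvail_succ (nums : List Int) (i : Int) (hi : 0 ≤ i) (removed : PySem.Set Int)
    (hrem : PySem.Set.contains removed i = false) :
    pvAvail nums (i + 1) removed =
      pvAvail nums i removed ++ (if pvVal nums i < 0 then [pvVal nums i] else []) := by
  unfold pvAvail
  rw [PySem.List.pyRange_one_succ_right hi]
  rw [List.filter_append, List.map_append]
  have hnm : i ∉ removed := by simpa using hrem
  congr 1
  by_cases h : pvVal nums i < 0
  · simp [h, hnm]
  · simp [h]

lemma pvMem_add (s : PySem.Set Int) (x k : Int) (hk : k ∈ PySem.Set.add s x) : k ∈ s ∨ k = x := by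
  unfold PySem.Set.add at hk
  split_ifs at hk with h
  · exact Or.inl hk
  · rcases List.mem_append.mp hk with h1 | h1
    · exact Or.inl h1
    · exact Or.inr (List.mem_singleton.mp h1)

-- destructure membership in the available multiset
lemma pvAvail_mem_elim (nums : List Int) (i : Int) (s : PySem.Set Int) (v : Int)
    (hv : v ∈ pvAvail nums i s) :
    ∃ k, k ∈ PySem.List.pyRange 0 i 1 ∧ PySem.Set.contains s k = false ∧ pvVal nums k = v ∧ v < 0 := by
  unfold pvAvail at hv
  obtain ⟨k, hk, rfl⟩ := List.mem_map.mp hv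
  have h2 := (List.mem_filter.mp hk).2
  simp only [Bool.and_eq_true, Bool.not_eq_true', decide_eq_true_eq] at h2
  exact ⟨k, (List.mem_filter.mp hk).1, by simpa using h2.2, rfl, h2.1⟩

-- adding an index that lies outside the window does not change the available multiset
lemma pvAvail_add_out (nums : List Int) (i : Int) (s : PySem.Set Int) (j : Int) (hj : j < 0) :
    pvAvail nums i (PySem.Set.add s j) = pvAvail nums i s := by
  unfold pvAvail
  rw [List.filter_congr]
  intro k hk
  have hk0 : 0 ≤ k := (PySem.List.mem_pyRange_one.mp hk).1
  have hne : k ≠ j := by omega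
  simp [hne]

-- removing a chosen index erases one occurrence of its value from the available multiset
lemma pvAvail_add_perm (nums : List Int) (i : Int) (removed : PySem.Set Int) (j : Int)
    (hj : j ∈ PySem.List.pyRange 0 i 1) (hneg : pvVal nums j < 0)
    (hrem : PySem.Set.contains removed j = false) :
    (pvAvail nums i (PySem.Set.add removed j)).Perm ((pvAvail nums i removed).erase (pvVal nums j)) := by
  have hnm : j ∉ removed := by simpa using hrem
  have hF : ((PySem.List.pyRange 0 i 1).filter
      (fun k => decide (pvVal nums k < 0) && !(PySem.Set.contains removed k))).Nodup :=
    List.Nodup.filter _ (PySem.List.nodup_pyRange_one 0 i)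
  have hjF : j ∈ (PySem.List.pyRange 0 i 1).filter
      (fun k => decide (pvVal nums k < 0) && !(PySem.Set.contains removed k)) :=
    List.mem_filter.mpr ⟨hj, by simp [hneg, hnm]⟩
  have hfilter : (PySem.List.pyRange 0 i 1).filter
      (fun k => decide (pvVal nums k < 0) && !(PySem.Set.contains (PySem.Set.add removed j) k)) =
      ((PySem.List.pyRange 0 i 1).filter
        (fun k => decide (pvVal nums k < 0) && !(PySem.Set.contains removed k))).erase j := by
    rw [List.Nodup.erase_eq_filter hF, List.filter_filter]
    exact List.filter_congr (fun k _ => by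
      by_cases hkj : k = j
      · subst hkj; simp
      · simp [hkj, Bool.and_comm])
  unfold pvAvail
  rw [hfilter]
  have hperm1 : (((PySem.List.pyRange 0 i 1).filter
      (fun k => decide (pvVal nums k < 0) && !(PySem.Set.contains removed k))).erase j).map (pvVal nums) |>.Perm
      ((((PySem.List.pyRange 0 i 1).filter
        (fun k => decide (pvVal nums k < 0) && !(PySem.Set.contains removed k))).map (pvVal nums)).erase (pvVal nums j)) := by
    have h1 := (List.perm_cons_erase hjF).map (pvVal nums)
    have h2 := List.perm_cons_erase (List.mem_map_of_mem (f := pvVal nums) hjF)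
    simp only [List.map_cons] at h1
    exact (List.perm_cons (pvVal nums j)).mp (h1.symm.trans h2)
  exact hperm1

-- one synchronized step of both loops preserves the invariant
lemma pvStep (nums : List Int) (i : Nat) (hi : i < nums.length)
    (a : Int × Int × List Int) (b : Int × Int × PySem.Set Int)
    (h : pvInv nums i a b) :
    pvInv nums (i + 1) (magicTowerStepA a nums[i]) (magicTowerStepB nums b (i : Int)) := by
  obtain ⟨hl, ha, hs, hp, hb⟩ := h
  have hval : PySem.List.pyGetD nums (i : Int) 0 = nums[i] := by
    rw [PySem.List.pyGetD_natCast]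
    exact List.getD_eq_getElem nums 0 hi
  have hvali : pvVal nums (i : Int) = nums[i] := hval
  have hremi : PySem.Set.contains b.2.2 (i : Int) = false := by
    by_contra hc
    have hmem : (i : Int) ∈ b.2.2 := by
      simpa using Bool.of_not_eq_false hc
    rcases hb _ hmem with h1 | ⟨h2, h3⟩ <;> omega
  have hcast : ((i + 1 : Nat) : Int) = (i : Int) + 1 := by push_cast; ring
  unfold magicTowerStepA magicTowerStepB
  simp only [hl, ha, hval]
  set x := nums[i] with hx
  set q' : List Int := if x < 0 then a.2.2.orderedInsert (· ≤ ·) x else a.2.2 with hq'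
  have hq's : q'.Pairwise (· ≤ ·) := by
    rw [hq']; split
    · exact List.Pairwise.orderedInsert x a.2.2 hs
    · exact hs
  have hq'p : q'.Perm (pvAvail nums ((i : Int) + 1) b.2.2) := by
    rw [pvAvail_succ nums (i : Int) (by positivity) b.2.2 hremi, hvali]
    rw [hq']
    by_cases hneg : x < 0
    · simp only [if_pos hneg]
      exact (List.perm_orderedInsert _ x a.2.2).trans
        ((hp.cons x).trans (List.perm_append_singleton x _).symm)
    · simp only [if_neg hneg, List.append_nil]
      exact hp
  by_cases hle : b.1 + x ≤ 0
  · simp only [if_pos hle]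
    set r := (PySem.List.pyRange 0 ((i : Int) + 1) 1).foldl (magicTowerScanStep nums b.2.2) (0, -1)
      with hr
    have hmin := pvScan_min nums b.2.2 (PySem.List.pyRange 0 ((i : Int) + 1) 1) 0 (-1)
    have hcases := pvScan_cases nums b.2.2 (PySem.List.pyRange 0 ((i : Int) + 1) 1) 0 (-1)
    rw [← hr] at hmin hcases
    have hminA : ∀ v ∈ pvAvail nums ((i : Int) + 1) b.2.2, r.1 ≤ v := by
      intro v hv
      obtain ⟨k, hk, hkc, hkv, _⟩ := pvAvail_mem_elim nums _ _ v hv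
      rw [← hkv]
      exact hmin.2 k hk hkc
    cases hq'' : q' with
    | nil =>
      have hA1 : pvAvail nums ((i : Int) + 1) b.2.2 = [] :=
        ((hq'' ▸ hq'p).symm.eq_nil)
      have hr01 : r = (0, -1) := by
        rcases hcases with he | ⟨h1, h2, h3, h4⟩
        · exact he
        · exfalso
          have : pvVal nums r.2 ∈ pvAvail nums ((i : Int) + 1) b.2.2 :=
            pvAvail_mem_of nums _ _ r.2 h2 (by omega) h3
          rw [hA1] at this
          exact absurd this (List.not_mem_nil)
      refine ⟨by simp [hr01], rfl, by simp, ?_, ?_⟩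
      · rw [hr01]
        simp only [List.tail_nil, hcast]
        rw [pvAvail_add_out nums _ _ _ (by norm_num), hA1]
      · intro y hy
        rcases pvMem_add _ _ _ hy with h1 | h1
        · rcases hb y h1 with h2 | ⟨h2, h3⟩
          · exact Or.inl h2
          · exact Or.inr ⟨h2, by push_cast; omega⟩
        · rw [hr01] at h1
          exact Or.inl h1
    | cons hd tl =>
      have hdA : hd ∈ pvAvail nums ((i : Int) + 1) b.2.2 :=
        hq'p.mem_iff.mp (hq'' ▸ List.mem_cons_self)
      have hd0 : hd < 0 := pvAvail_lt_zero nums _ _ hd hdA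
      have hrle : r.1 ≤ hd := hminA hd hdA
      rcases hcases with he | ⟨h1, h2, h3, h4⟩
      · exfalso; rw [he] at hrle; omega
      · have hr1A : r.1 ∈ pvAvail nums ((i : Int) + 1) b.2.2 := by
          have := pvAvail_mem_of nums _ _ r.2 h2 (by omega) h3
          rwa [h4] at this
        have hdle : hd ≤ r.1 := by
          have hsorted := hq'' ▸ hq's
          have hmemq : r.1 ∈ q' := hq'p.mem_iff.mpr hr1A
          rw [hq''] at hmemq
          rcases List.mem_cons.mp hmemq with he' | hm'
          · omega
          · exact (List.pairwise_cons.mp hsorted).1 r.1 hm'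
        have heq : r.1 = hd := le_antisymm hrle hdle
        have hperm2 := pvAvail_add_perm nums ((i : Int) + 1) b.2.2 r.2 h2 (by omega) h3
        rw [h4, heq] at hperm2
        refine ⟨by simp [heq], rfl, ?_, ?_, ?_⟩
        · simpa using (List.pairwise_cons.mp (hq'' ▸ hq's)).2
        · simp only [List.tail_cons, hcast]
          have htl : tl.Perm ((pvAvail nums ((i : Int) + 1) b.2.2).erase hd) := by
            have := (hq'' ▸ hq'p).erase hd
            rwa [List.erase_cons_head] at this
          exact htl.trans hperm2.symm
        · intro y hy
          rcases pvMem_add _ _ _ hy with hy1 | hy1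
          · rcases hb y hy1 with h5 | ⟨h5, h6⟩
            · exact Or.inl h5
            · exact Or.inr ⟨h5, by push_cast; omega⟩
          · have := PySem.List.mem_pyRange_one.mp (hy1 ▸ h2)
            exact Or.inr ⟨this.1, by push_cast; omega⟩
  · simp only [if_neg hle]
    refine ⟨rfl, rfl, hq's, ?_, ?_⟩
    · rw [hcast]; exact hq'p
    · intro y hy
      rcases hb y hy with h1 | ⟨h1, h2⟩
      · exact Or.inl h1
      · exact Or.inr ⟨h1, by push_cast; omega⟩

lemma pvMain (nums : List Int) :
    ∀ i, i ≤ nums.length →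
      pvInv nums i ((nums.take i).foldl magicTowerStepA (1, 0, []))
        ((PySem.List.pyRange 0 (i : Int) 1).foldl (magicTowerStepB nums) (1, 0, PySem.Set.empty)) := by
  intro i
  induction i with
  | zero =>
    intro _
    refine ⟨rfl, rfl, List.Pairwise.nil, ?_, by simp [PySem.Set.empty]⟩
    simp [pvAvail, PySem.List.pyRange_one_eq_nil (le_refl 0)]
  | succ i ih =>
    intro hle
    have hi : i < nums.length := Nat.lt_of_succ_le hle
    have h1 : nums.take (i + 1) = nums.take i ++ [nums[i]] := by
      rw [List.take_add_one]
      simp [List.getElem?_eq_getElem hi]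
    have h2 : PySem.List.pyRange 0 ((i + 1 : Nat) : Int) 1 =
        PySem.List.pyRange 0 (i : Int) 1 ++ [(i : Int)] := by
      push_cast
      exact PySem.List.pyRange_one_succ_right (by positivity)
    rw [h1, h2, List.foldl_append, List.foldl_append]
    simp only [List.foldl_cons, List.foldl_nil]
    exact pvStep nums i hi _ _ (ih (le_of_lt hi))

-- ===== VERDICT (by name: the statement is the Claim_ definition above) =====
theorem magicTower_spec : Claim_equal_magicTower := by
  intro nums _
  unfold Spec_magicTower magicTower magicTower_alt
  by_cases hsum : nums.sum ≤ -1
  · simp [hsum]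
  · simp only [if_neg hsum]
    have h := pvMain nums nums.length (le_refl _)
    rw [List.take_length] at h
    rw [h.1, h.2.1]
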